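-- pv_equiv track=rewrite | github.com/icareerclimber/career-skills-capstone | model_pipeline/functions/process_edu_titles.py | find_best_degree_category
-- ===== SOURCE A (Python) =====
-- def find_best_degree_category(list_of_degree_categories):
--     # This function takes a list of degree categories and returns the highest ranked one
--     # The `degree_category_ranking` list shows ranking of the categories
--     # Each row will be assigned only 1 degree category in the end
--     degree_category_ranking = ['minor',
--                 'all but dissertation',
--                 'juris doctor',
--                 'doctorate',
--                 'associates',
--                 'some education',
--                 'masters',
--                 'bachelors',
--                 'license',
--                 'hs diploma',
--                 'vocational',
--                 'certificate']
--
--     final_degree_category_list = []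
--     for row in list_of_degree_categories:
--         if len(row) > 1:
--             for job in degree_category_ranking:
--                 if job in row:
--                     final_degree_category_list.append(job)
--                     break
--         elif len(row) == 1:
--             final_degree_category_list.append(row[0])
--         else:
--             final_degree_category_list.append('unknown')
--
--     return final_degree_category_list
-- ===== SOURCE B (Python) =====
-- def find_best_degree_category(list_of_degree_categories):
--     # Build a rank table once, then pick the minimum-rank element of each row
--     # in a single pass over the row (no repeated membership scans).
--     degree_category_ranking = ['minor',
--                 'all but dissertation',
--                 'juris doctor',
--                 'doctorate',
--                 'associates',
--                 'some education',
--                 'masters',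
--                 'bachelors',
--                 'license',
--                 'hs diploma',
--                 'vocational',
--                 'certificate']
--     rank = {c: i for i, c in enumerate(degree_category_ranking)}
--
--     out = []
--     for row in list_of_degree_categories:
--         if not row:
--             out.append('unknown')
--         elif len(row) == 1:
--             out.append(row[0])
--         else:
--             best = None
--             for x in row:
--                 r = rank.get(x)
--                 if r is not None and (best is None or r < best[0]):
--                     best = (r, x)
--             if best is not None:
--                 out.append(best[1])
--     return out
-- ===== Notes on version B (the rewrite author's own statement) =====
-- stated objective: faster
-- what changed: B builds a rank dictionary once and takes a single min-by-rank pass over each multi-element row, instead of A's scan over the 12-entry ranking list with a membership test of the whole row at every step.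
import Mathlib
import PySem

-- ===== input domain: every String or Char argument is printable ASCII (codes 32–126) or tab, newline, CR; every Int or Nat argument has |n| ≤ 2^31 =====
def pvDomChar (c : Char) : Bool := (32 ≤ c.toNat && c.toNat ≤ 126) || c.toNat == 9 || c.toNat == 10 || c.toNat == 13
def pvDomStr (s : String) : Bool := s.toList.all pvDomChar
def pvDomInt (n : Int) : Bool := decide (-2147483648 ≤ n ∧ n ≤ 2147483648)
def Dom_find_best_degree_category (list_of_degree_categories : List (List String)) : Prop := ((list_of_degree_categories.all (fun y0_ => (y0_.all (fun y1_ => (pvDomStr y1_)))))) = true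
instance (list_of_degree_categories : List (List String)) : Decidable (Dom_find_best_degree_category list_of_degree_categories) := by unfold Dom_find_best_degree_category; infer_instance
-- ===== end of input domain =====

-- B replaces A's scan over the 12-entry ranking list (membership test of the row at each
-- step, with break) by a rank dictionary built once and a single min-by-rank pass over each row.

-- ===== PORT A =====
-- the ranking list shared by both versions (same literal in Source A and Source B)
def pvRanking : List String :=
  ["minor", "all but dissertation", "juris doctor", "doctorate", "associates",
   "some education", "masters", "bachelors", "license", "hs diploma",
   "vocational", "certificate"]

-- A's inner 'for job in degree_category_ranking: if job in row: append; break'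
def pvFirstIn : List String → List String → Option String
  | [], _ => none
  | j :: rest, row => if row.contains j then some j else pvFirstIn rest row

def find_best_degree_category (list_of_degree_categories : List (List String)) : List String :=
  list_of_degree_categories.foldl (fun acc row =>
    if row.length > 1 then
      match pvFirstIn pvRanking row with
      | some j => acc ++ [j]
      | none => acc
    else if row.length == 1 then
      -- row[0]; exact: the branch guarantees the index is in range, so getD is never the default
      acc ++ [(PySem.List.pyGet? row 0).getD ""]
    else
      acc ++ ["unknown"]) []

-- ===== PORT B =====
-- rank = {c: i for i, c in enumerate(degree_category_ranking)}
def pvRank : PySem.Dict String Int :=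
  (PySem.List.enumerate pvRanking).foldl (fun d ic => d.insert ic.2 ic.1) PySem.Dict.empty

-- one step of Source B's inner loop maintaining best = (rank, element)
def pvStep (best : Option (Int × String)) (x : String) : Option (Int × String) :=
  match pvRank.get? x with
  | none => best
  | some r =>
    match best with
    | none => some (r, x)
    | some (rb, _) => if r < rb then some (r, x) else best

def find_best_degree_category_alt (list_of_degree_categories : List (List String)) : List String :=
  list_of_degree_categories.foldl (fun out row =>
    match row with
    | [] => out ++ ["unknown"]
    | [x] => out ++ [x]
    | _ =>
      match row.foldl pvStep none with
      | some (_, xb) => out ++ [xb]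
      | none => out) []

-- ===== PRECONDITION & SPEC =====
def Spec_find_best_degree_category (list_of_degree_categories : List (List String)) (out : List String) : Prop := out = find_best_degree_category_alt list_of_degree_categories
instance (list_of_degree_categories : List (List String)) (out : List String) : Decidable (Spec_find_best_degree_category list_of_degree_categories out) := by unfold Spec_find_best_degree_category; infer_instance

-- ===== CLAIM (what is proved, stated in full; the proofs are below) =====
def Claim_equal_find_best_degree_category : Prop := ∀ (list_of_degree_categories : List (List String)), Dom_find_best_degree_category list_of_degree_categories → Spec_find_best_degree_category list_of_degree_categories (find_best_degree_category list_of_degree_categories)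

-- ===== LEMMAS AND PROOFS =====

-- first-index function: idxI L x = index of x in L (as Python int), if present
def idxI : List String → String → Option Int
  | [], _ => none
  | a :: L, x => if a == x then some 0 else (idxI L x).map (· + 1)

-- the generic step using indices into an explicit list L
def stepL (L : List String) (b : Option (Int × String)) (x : String) : Option (Int × String) :=
  match idxI L x with
  | none => b
  | some r =>
    match b with
    | none => some (r, x)
    | some (rb, _) => if r < rb then some (r, x) else b

theorem idxI_nonneg : ∀ (L : List String) (x : String) (r : Int), idxI L x = some r → 0 ≤ r := by
  intro L
  induction L with
  | nil => intro x r h; simp [idxI] at h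
  | cons a L ih =>
    intro x r h
    simp only [idxI] at h
    split at h
    · simp at h; omega
    · cases hi : idxI L x with
      | none => simp [hi] at h
      | some r' => simp [hi] at h; have := ih x r' hi; omega

theorem rank_mk : pvRank = PySem.Dict.mk [("minor", 0), ("all but dissertation", 1), ("juris doctor", 2),
    ("doctorate", 3), ("associates", 4), ("some education", 5), ("masters", 6), ("bachelors", 7),
    ("license", 8), ("hs diploma", 9), ("vocational", 10), ("certificate", 11)] := by rfl

set_option maxHeartbeats 1000000 in
theorem rank_get_eq_idxI : ∀ x : String, pvRank.get? x = idxI pvRanking x := by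
  intro x
  rw [rank_mk]
  simp only [pvRanking, idxI, PySem.Dict.get?_mk_cons]
  by_cases h1 : ("minor" == x) = true
  · simp [h1]
  by_cases h2 : ("all but dissertation" == x) = true
  · simp [h1, h2]
  by_cases h3 : ("juris doctor" == x) = true
  · simp [h1, h2, h3]
  by_cases h4 : ("doctorate" == x) = true
  · simp [h1, h2, h3, h4]
  by_cases h5 : ("associates" == x) = true
  · simp [h1, h2, h3, h4, h5]
  by_cases h6 : ("some education" == x) = true
  · simp [h1, h2, h3, h4, h5, h6]
  by_cases h7 : ("masters" == x) = true
  · simp [h1, h2, h3, h4, h5, h6, h7]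
  by_cases h8 : ("bachelors" == x) = true
  · simp [h1, h2, h3, h4, h5, h6, h7, h8]
  by_cases h9 : ("license" == x) = true
  · simp [h1, h2, h3, h4, h5, h6, h7, h8, h9]
  by_cases h10 : ("hs diploma" == x) = true
  · simp [h1, h2, h3, h4, h5, h6, h7, h8, h9, h10]
  by_cases h11 : ("vocational" == x) = true
  · simp [h1, h2, h3, h4, h5, h6, h7, h8, h9, h10, h11]
  by_cases h12 : ("certificate" == x) = true
  · simp [h1, h2, h3, h4, h5, h6, h7, h8, h9, h10, h11, h12]
  simp [h1, h2, h3, h4, h5, h6, h7, h8, h9, h10, h11, h12, PySem.Dict.get?]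

theorem step_eq_stepL : pvStep = stepL pvRanking := by
  funext b x
  simp only [pvStep, stepL, rank_get_eq_idxI]

theorem foldl_stepL_nil : ∀ (row : List String) (b : Option (Int × String)),
    row.foldl (stepL []) b = b := by
  intro row
  induction row with
  | nil => intro b; rfl
  | cons x rest ih => intro b; simp [List.foldl_cons, stepL, idxI, ih]

theorem foldl_absorb (a : String) (L : List String) :
    ∀ (row : List String), row.foldl (stepL (a :: L)) (some (0, a)) = some (0, a) := by
  intro row
  induction row with
  | nil => rfl
  | cons x rest ih =>
    have hstep : stepL (a :: L) (some (0, a)) x = some (0, a) := by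
      simp only [stepL]
      cases hi : idxI (a :: L) x with
      | none => rfl
      | some r =>
        have := idxI_nonneg (a :: L) x r hi
        simp only []
        rw [if_neg (by omega)]
    rw [List.foldl_cons, hstep, ih]

theorem foldl_reach (a : String) (L : List String) :
    ∀ (row : List String) (b : Option (Int × String)), a ∈ row →
      (b = none ∨ ∃ rb xb, b = some (rb, xb) ∧ 0 < rb) →
      (row.foldl (stepL (a :: L)) b).map Prod.snd = some a := by
  intro row
  induction row with
  | nil => intro b h; simp at h
  | cons x rest ih =>
    intro b hmem hb
    rw [List.foldl_cons]
    by_cases hxa : x = a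
    · subst hxa
      have hidx : idxI (x :: L) x = some 0 := by simp [idxI]
      have hstep : stepL (x :: L) b x = some (0, x) := by
        simp only [stepL, hidx]
        rcases hb with hb | ⟨rb, xb, hb, hrb⟩
        · rw [hb]
        · rw [hb]; simp only []; rw [if_pos hrb]
      rw [hstep, foldl_absorb]
      rfl
    · have hmem' : a ∈ rest := by
        rcases List.mem_cons.mp hmem with h | h
        · exact absurd h.symm hxa
        · exact h
      apply ih _ hmem'
      have hne : (a == x) = false := beq_eq_false_iff_ne.mpr (Ne.symm hxa)
      have hidx : idxI (a :: L) x = (idxI L x).map (· + 1) := by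
        simp [idxI, hne]
      simp only [stepL, hidx]
      cases hi : idxI L x with
      | none => simpa using hb
      | some r =>
        have hr := idxI_nonneg L x r hi
        simp only [Option.map_some]
        rcases hb with hb | ⟨rb, xb, hb, hrb⟩
        · rw [hb]; right; exact ⟨r + 1, x, rfl, by omega⟩
        · rw [hb]
          right
          by_cases hc : r + 1 < rb
          · exact ⟨r + 1, x, by simp [hc], by omega⟩
          · exact ⟨rb, xb, by simp [hc], hrb⟩

def pvShift (b : Option (Int × String)) : Option (Int × String) :=
  b.map (fun p => (p.1 + 1, p.2))

theorem foldl_shift (a : String) (L : List String) :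
    ∀ (row : List String) (b : Option (Int × String)), a ∉ row →
      row.foldl (stepL (a :: L)) (pvShift b) = pvShift (row.foldl (stepL L) b) := by
  intro row
  induction row with
  | nil => intro b _; rfl
  | cons x rest ih =>
    intro b hmem
    have hxa : x ≠ a := fun h => hmem (h ▸ List.mem_cons_self)
    have hmem' : a ∉ rest := fun h => hmem (List.mem_cons_of_mem _ h)
    rw [List.foldl_cons, List.foldl_cons]
    have hstep : stepL (a :: L) (pvShift b) x = pvShift (stepL L b x) := by
      have hne : (a == x) = false := beq_eq_false_iff_ne.mpr (Ne.symm hxa)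
      have hidx : idxI (a :: L) x = (idxI L x).map (· + 1) := by
        simp [idxI, hne]
      simp only [stepL, hidx]
      cases hi : idxI L x with
      | none => rfl
      | some r =>
        simp only [Option.map_some]
        cases b with
        | none => rfl
        | some p =>
          obtain ⟨rb, xb⟩ := p
          simp only [pvShift, Option.map_some]
          split_ifs with h1 h2 h2 <;> first | rfl | omega
    rw [hstep, ih _ hmem']

theorem firstIn_eq_fold : ∀ (L row : List String),
    pvFirstIn L row = (row.foldl (stepL L) none).map Prod.snd := by
  intro L
  induction L with
  | nil => intro row; rw [foldl_stepL_nil]; rfl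
  | cons a L ih =>
    intro row
    by_cases hmem : a ∈ row
    · have : pvFirstIn (a :: L) row = some a := by simp [pvFirstIn, hmem]
      rw [this, foldl_reach a L row none hmem (Or.inl rfl)]
    · have h1 : pvFirstIn (a :: L) row = pvFirstIn L row := by simp [pvFirstIn, hmem]
      have h2 := foldl_shift a L row none hmem
      simp only [pvShift, Option.map_none] at h2
      rw [h1, ih, h2]
      cases row.foldl (stepL L) none <;> rfl

theorem row_body_eq (acc : List String) (row : List String) :
    (if row.length > 1 then
      match pvFirstIn pvRanking row with
      | some j => acc ++ [j]
      | none => acc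
    else if row.length == 1 then
      acc ++ [(PySem.List.pyGet? row 0).getD ""]
    else
      acc ++ ["unknown"]) =
    (match row with
    | [] => acc ++ ["unknown"]
    | [x] => acc ++ [x]
    | _ =>
      match row.foldl pvStep none with
      | some (_, xb) => acc ++ [xb]
      | none => acc) := by
  match row with
  | [] => simp
  | [x] => simp [PySem.List.pyGet?, PySem.List.pyIdx?]
  | x :: y :: rest =>
    have hlen : (x :: y :: rest).length > 1 := by simp
    rw [if_pos hlen]
    rw [step_eq_stepL, firstIn_eq_fold]
    cases h : (x :: y :: rest).foldl (stepL pvRanking) none with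
    | none => rfl
    | some p => obtain ⟨r, xb⟩ := p; rfl

-- ===== VERDICT (by name: the statement is the Claim_ definition above) =====
theorem find_best_degree_category_spec : Claim_equal_find_best_degree_category := by
  intro l _
  unfold Spec_find_best_degree_category find_best_degree_category find_best_degree_category_alt
  congr 1
  funext acc row
  exact row_body_eq acc row
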